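-- pv_equiv track=rewrite | github.com/Generative-Logic/GL | configuration_reader.py | _align_and_sort_args
-- ===== SOURCE A (Python) =====
-- from typing import Dict, Any, Iterator, Optional, List, Mapping, Tuple, Set, Union
--
-- def _align_and_sort_args(names: List[str], ordered_args: List[str]) -> Tuple[List[str], List[int]]:
--     """
--     Return (sorted_names, sorted_indices), ordered by the 0-based first occurrence
--     of each name in `ordered_args`. Missing names are dropped; duplicates are kept.
--     Sorting is stable for ties (same index).
--     """
--     first_index: Dict[str, int] = {}
--     for i, arg in enumerate(ordered_args):
--         if arg not in first_index:
--             first_index[arg] = i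
--
--     triples = [(first_index[n], pos, n) for pos, n in enumerate(names) if n in first_index]
--     triples.sort(key=lambda t: (t[0], t[1]))  # sort by index, then original position for stability
--
--     sorted_indices = [idx for idx, _, _ in triples]
--     sorted_names = [n for _, _, n in triples]
--     return sorted_names, sorted_indices
-- ===== SOURCE B (Python) =====
-- from typing import Dict, List, Tuple
--
-- def _align_and_sort_args(names: List[str], ordered_args: List[str]) -> Tuple[List[str], List[int]]:
--     """Bucket version: group names by the first-occurrence index of each name in
--     ordered_args, then drain the buckets in increasing index order (no comparison sort)."""
--     first_index: Dict[str, int] = {}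
--     for i, arg in enumerate(ordered_args):
--         if arg not in first_index:
--             first_index[arg] = i
--
--     buckets: Dict[int, List[str]] = {}
--     for n in names:
--         i = first_index.get(n)
--         if i is not None:
--             buckets.setdefault(i, []).append(n)
--
--     sorted_names: List[str] = []
--     sorted_indices: List[int] = []
--     for i in range(len(ordered_args)):
--         bucket = buckets.get(i, [])
--         sorted_names += bucket
--         sorted_indices += [i] * len(bucket)
--     return sorted_names, sorted_indices
-- ===== Notes on version B (the rewrite author's own statement) =====
-- stated objective: alternative
-- what changed: Replaces the comparison sort of (index,pos,name) triples by a bucket pass: names are grouped into per-first-index buckets in one scan and the buckets are drained in increasing index order over range(len(ordered_args)).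
import Mathlib
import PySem

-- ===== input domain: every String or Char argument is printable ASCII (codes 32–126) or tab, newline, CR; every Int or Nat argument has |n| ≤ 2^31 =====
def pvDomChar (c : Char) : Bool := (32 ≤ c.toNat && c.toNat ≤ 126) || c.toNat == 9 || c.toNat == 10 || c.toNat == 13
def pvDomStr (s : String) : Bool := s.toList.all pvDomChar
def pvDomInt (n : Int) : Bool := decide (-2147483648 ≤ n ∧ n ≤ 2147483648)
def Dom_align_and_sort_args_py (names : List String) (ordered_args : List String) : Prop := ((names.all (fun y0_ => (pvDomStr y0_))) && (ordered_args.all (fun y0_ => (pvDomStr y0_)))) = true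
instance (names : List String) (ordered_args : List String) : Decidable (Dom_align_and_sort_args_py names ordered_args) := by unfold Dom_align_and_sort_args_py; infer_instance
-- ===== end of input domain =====

-- B replaces A's comparison sort of (index, pos, name) triples by bucketing the names per
-- first-occurrence index and draining the buckets in increasing index order (alternative
-- decomposition, same return value).

-- ===== PORT A =====
-- first_index = {}; for i, arg in enumerate(ordered_args): if arg not in first_index: first_index[arg] = i
def pvFirstIndex (ordered_args : List String) : PySem.Dict String Int :=
  (PySem.List.enumerate ordered_args).foldl
    (fun d pr => if d.contains pr.2 then d else d.insert pr.2 pr.1) PySem.Dict.empty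

def align_and_sort_args_py (names : List String) (ordered_args : List String) : List String × List Int :=
  let first_index := pvFirstIndex ordered_args
  -- triples = [(first_index[n], pos, n) for pos, n in enumerate(names) if n in first_index]
  -- (first_index[n] is guarded by 'if n in first_index', so getD is exact here)
  let triples : List (Int × Int × String) :=
    ((PySem.List.enumerate names).filter (fun p => first_index.contains p.2)).map
      (fun p => (first_index.getD p.2 0, p.1, p.2))
  -- triples.sort(key=lambda t: (t[0], t[1]))
  let triples := PySem.List.sorted2 triples (fun t => t.1) (fun t => t.2.1)
  let sorted_indices := triples.map (fun t => t.1)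
  let sorted_names := triples.map (fun t => t.2.2)
  (sorted_names, sorted_indices)

-- ===== PORT B =====
def align_and_sort_args_py_alt (names : List String) (ordered_args : List String) : List String × List Int :=
  let first_index := pvFirstIndex ordered_args
  -- buckets = {}; for n in names: i = first_index.get(n); if i is not None: buckets.setdefault(i, []).append(n)
  let buckets : PySem.Dict Int (List String) :=
    names.foldl (fun b n =>
      match first_index.get? n with
      | some i => b.modify i [] (fun l => l ++ [n])
      | none => b) PySem.Dict.empty
  -- for i in range(len(ordered_args)): bucket = buckets.get(i, []); sorted_names += bucket; sorted_indices += [i]*len(bucket)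
  (PySem.List.pyRange 0 (PySem.List.len ordered_args)).foldl
    (fun acc i =>
      let bucket := buckets.getD i []
      (acc.1 ++ bucket, acc.2 ++ PySem.List.pyRepeat [i] (PySem.List.len bucket)))
    ([], [])

-- ===== PRECONDITION & SPEC =====
def Spec_align_and_sort_args_py (names : List String) (ordered_args : List String) (out : List String × List Int) : Prop := out = align_and_sort_args_py_alt names ordered_args
instance (names : List String) (ordered_args : List String) (out : List String × List Int) : Decidable (Spec_align_and_sort_args_py names ordered_args out) := by unfold Spec_align_and_sort_args_py; infer_instance

-- ===== CLAIM (what is proved, stated in full; the proofs are below) =====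
def Claim_equal_align_and_sort_args_py : Prop := ∀ (names : List String) (ordered_args : List String), Dom_align_and_sort_args_py names ordered_args → Spec_align_and_sort_args_py names ordered_args (align_and_sort_args_py names ordered_args)

-- ===== LEMMAS AND PROOFS =====

-- the triples list of port A, before sorting
def pvTriples (names : List String) (ordered_args : List String) : List (Int × Int × String) :=
  ((PySem.List.enumerate names).filter (fun p => (pvFirstIndex ordered_args).contains p.2)).map
    (fun p => ((pvFirstIndex ordered_args).getD p.2 0, p.1, p.2))

-- the bucket concatenation both sides compute
def pvBuckets (names : List String) (ordered_args : List String) : List (Int × Int × String) :=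
  (PySem.List.pyRange 0 (PySem.List.len ordered_args)).flatMap
    (fun i => (pvTriples names ordered_args).filter (fun t => decide (t.1 = i)))

-- B's buckets dict
def pvBucketsDict (names : List String) (ordered_args : List String) : PySem.Dict Int (List String) :=
  names.foldl (fun b n =>
    match (pvFirstIndex ordered_args).get? n with
    | some i => b.modify i [] (fun l => l ++ [n])
    | none => b) PySem.Dict.empty

theorem pvPortA_eq (names ordered_args : List String) :
    align_and_sort_args_py names ordered_args =
      ((PySem.List.sorted2 (pvTriples names ordered_args) (fun t => t.1) (fun t => t.2.1)).map (fun t => t.2.2),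
       (PySem.List.sorted2 (pvTriples names ordered_args) (fun t => t.1) (fun t => t.2.1)).map (fun t => t.1)) := rfl

theorem pvPortB_eq (names ordered_args : List String) :
    align_and_sort_args_py_alt names ordered_args =
      (PySem.List.pyRange 0 (PySem.List.len ordered_args)).foldl
        (fun acc i =>
          (acc.1 ++ (pvBucketsDict names ordered_args).getD i [],
           acc.2 ++ PySem.List.pyRepeat [i] (PySem.List.len ((pvBucketsDict names ordered_args).getD i []))))
        ([], []) := rfl

-- every value stored in pvFirstIndex lies in [0, len ordered_args)
theorem pvFI_aux (l : List String) : ∀ (s : Int) (d : PySem.Dict String Int),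
    (∀ n i, d.get? n = some i → 0 ≤ i ∧ i < s) → 0 ≤ s →
    ∀ n i, ((PySem.List.enumerate l s).foldl
        (fun d pr => if d.contains pr.2 then d else d.insert pr.2 pr.1) d).get? n = some i →
      0 ≤ i ∧ i < s + l.length := by
  induction l with
  | nil =>
    intro s d hd _ n i h
    simp only [PySem.List.enumerate_nil, List.foldl_nil] at h
    obtain ⟨h1, h2⟩ := hd n i h
    refine ⟨h1, ?_⟩
    simp only [List.length_nil, Nat.cast_zero]
    omega
  | cons a l ih =>
    intro s d hd hs n i h
    rw [PySem.List.enumerate_cons, List.foldl_cons] at h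
    have hnext : ∀ n i,
        (if d.contains a then d else d.insert a s).get? n = some i → 0 ≤ i ∧ i < s + 1 := by
      intro n i hni
      by_cases hc : d.contains a
      · simp only [hc, if_true] at hni
        have := hd n i hni; exact ⟨this.1, by omega⟩
      · simp only [hc, Bool.false_eq_true, if_false] at hni
        rw [PySem.Dict.get?_insert] at hni
        by_cases hna : n = a
        · simp [hna] at hni; omega
        · simp [hna] at hni
          have := hd n i hni; exact ⟨this.1, by omega⟩
    have := ih (s + 1) _ hnext (by omega) n i h
    refine ⟨this.1, ?_⟩
    have h2 := this.2
    simp only [List.length_cons]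
    push_cast at h2 ⊢
    omega

theorem pvFirstIndex_val_bounds (ordered_args : List String) (n : String) (i : Int)
    (h : (pvFirstIndex ordered_args).get? n = some i) :
    0 ≤ i ∧ i < (ordered_args.length : Int) := by
  have := pvFI_aux ordered_args 0 PySem.Dict.empty
    (by intro n i h; simp [PySem.Dict.get?_empty] at h) le_rfl n i (by simpa [pvFirstIndex] using h)
  simpa using this

theorem pvTriples_mem_fst_bounds (names ordered_args : List String) (t : Int × Int × String)
    (ht : t ∈ pvTriples names ordered_args) :
    0 ≤ t.1 ∧ t.1 < (ordered_args.length : Int) := by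
  unfold pvTriples at ht
  obtain ⟨p, hp, rfl⟩ := List.mem_map.1 ht
  have hc : (pvFirstIndex ordered_args).contains p.2 = true := (List.mem_filter.1 hp).2
  rw [PySem.Dict.contains_eq_isSome_get?] at hc
  obtain ⟨j, hj⟩ := Option.isSome_iff_exists.1 hc
  have hg : (pvFirstIndex ordered_args).getD p.2 0 = j := PySem.Dict.getD_of_get?_eq_some _ _ hj
  simpa [hg] using pvFirstIndex_val_bounds ordered_args p.2 j hj

theorem pvTriples_pairwise_pos (names ordered_args : List String) :
    (pvTriples names ordered_args).Pairwise (fun a b => a.2.1 < b.2.1) := by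
  unfold pvTriples
  exact ((PySem.List.pairwise_lt_enumerate names 0).filter _).map _ (fun a b h => h)

-- generic: insertBy only looks at 'before' on the involved elements
theorem pvInsertBy_congr {α : Type} (b1 b2 : α → α → Bool) (x : α) :
    ∀ (ys : List α), (∀ y ∈ ys, b1 x y = b2 x y) →
      PySem.List.insertBy b1 x ys = PySem.List.insertBy b2 x ys := by
  intro ys
  induction ys with
  | nil => intro _; rfl
  | cons y ys ih =>
    intro h
    simp only [PySem.List.insertBy]
    rw [h y (by simp)]
    by_cases hb : b2 x y = true
    · simp [hb]
    · simp only [Bool.not_eq_true] at hb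
      simp [hb, ih (fun z hz => h z (by simp [hz]))]

theorem pvFoldl_insertBy_congr {α : Type} (Q : α → Prop) (b1 b2 : α → α → Bool)
    (h : ∀ a b, Q a → Q b → b1 a b = b2 a b) :
    ∀ (xs acc : List α), (∀ x ∈ xs, Q x) → (∀ y ∈ acc, Q y) →
      xs.foldl (fun acc x => PySem.List.insertBy b1 x acc) acc
        = xs.foldl (fun acc x => PySem.List.insertBy b2 x acc) acc := by
  intro xs
  induction xs with
  | nil => intro acc _ _; rfl
  | cons x xs ih =>
    intro acc hxs hacc
    simp only [List.foldl_cons]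
    rw [pvInsertBy_congr b1 b2 x acc (fun y hy => h x y (hxs x (by simp)) (hacc y hy))]
    refine ih _ (fun z hz => hxs z (by simp [hz])) ?_
    intro y hy
    rcases (PySem.List.mem_insertBy _ _ _ _).1 hy with rfl | hy
    · exact hxs y (by simp)
    · exact hacc y hy

-- generic: draining nodup buckets is a permutation
theorem pvFlatMap_filter_perm_aux {α : Type} (key : α → Int) (t : α) (T : List α) :
    ∀ (r : List Int), r.Nodup → key t ∈ r →
      (r.flatMap (fun i => (t :: T).filter (fun x => decide (key x = i)))).Perm
        (t :: r.flatMap (fun i => T.filter (fun x => decide (key x = i)))) := by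
  intro r
  induction r with
  | nil => intro _ h; simp at h
  | cons j r ihr =>
    intro hnd hmem
    have hndr : r.Nodup := (List.nodup_cons.1 hnd).2
    have hjr : j ∉ r := (List.nodup_cons.1 hnd).1
    simp only [List.flatMap_cons]
    by_cases hj : key t = j
    · have hrest : r.flatMap (fun i => (t :: T).filter (fun x => decide (key x = i)))
          = r.flatMap (fun i => T.filter (fun x => decide (key x = i))) := by
        apply List.flatMap_congr
        intro i hi
        have : key t ≠ i := by rintro rfl; exact hjr (hj ▸ hi)
        simp [this]
      rw [hrest, List.filter_cons, if_pos (by simp [hj])]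
      simp
    · rw [List.filter_cons, if_neg (by simp [hj])]
      have hmem' : key t ∈ r := by
        rcases List.mem_cons.1 hmem with h | h
        · exact absurd h hj
        · exact h
      exact (List.Perm.append_left _ (ihr hndr hmem')).trans List.perm_middle

theorem pvFlatMap_filter_perm {α : Type} (key : α → Int) :
    ∀ (T : List α) (r : List Int), r.Nodup → (∀ t ∈ T, key t ∈ r) →
      (r.flatMap (fun i => T.filter (fun t => decide (key t = i)))).Perm T := by
  intro T
  induction T with
  | nil => intro r _ _; simp
  | cons t T ihT =>
    intro r hnd h
    exact (pvFlatMap_filter_perm_aux key t T r hnd (h t (by simp))).trans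
      (List.Perm.cons t (ihT r hnd (fun z hz => h z (by simp [hz]))))

-- the sorted2 of port A equals the bucket concatenation
theorem pvSorted_eq_buckets (names ordered_args : List String) :
    PySem.List.sorted2 (pvTriples names ordered_args) (fun t => t.1) (fun t => t.2.1)
      = pvBuckets names ordered_args := by
  have hA : PySem.List.sorted2 (pvTriples names ordered_args) (fun t => t.1) (fun t => t.2.1)
      = (pvTriples names ordered_args).foldl
          (fun acc x => PySem.List.insertBy
            (fun a b => decide (a.1 < b.1) || !decide (b.1 < a.1) && decide (a.2.1 < b.2.1)) x acc) [] := rfl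
  have hB : PySem.List.sorted (pvTriples names ordered_args)
        (fun t => toLex (t.1, t.2.1) : Int × Int × String → Lex (Int × Int))
      = (pvTriples names ordered_args).foldl
          (fun acc x => PySem.List.insertBy
            (fun a b => decide ((toLex (a.1, a.2.1) : Lex (Int × Int)) < toLex (b.1, b.2.1))) x acc) [] := rfl
  have hstep : PySem.List.sorted2 (pvTriples names ordered_args) (fun t => t.1) (fun t => t.2.1)
      = PySem.List.sorted (pvTriples names ordered_args)
          (fun t => toLex (t.1, t.2.1) : Int × Int × String → Lex (Int × Int)) := by
    rw [hA, hB]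
    apply pvFoldl_insertBy_congr (fun t => t ∈ pvTriples names ordered_args)
    · intro a b _ _
      have hlt : (toLex (a.1, a.2.1) < toLex (b.1, b.2.1)) ↔
          (a.1 < b.1 ∨ a.1 = b.1 ∧ a.2.1 < b.2.1) := Prod.Lex.toLex_lt_toLex
      by_cases h1 : a.1 < b.1 <;> by_cases h2 : b.1 < a.1 <;> by_cases h3 : a.2.1 < b.2.1 <;>
        simp [h1, h2, h3, hlt] <;> omega
    · exact fun x hx => hx
    · intro y hy; simp at hy
  rw [hstep]
  unfold pvBuckets
  apply PySem.List.sorted_eq_of_perm_of_pairwise_lt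
  · exact pvFlatMap_filter_perm (fun t => t.1) (pvTriples names ordered_args)
      (PySem.List.pyRange 0 (PySem.List.len ordered_args))
      (PySem.List.nodup_pyRange_one _ _)
      (fun t ht => by
        have := pvTriples_mem_fst_bounds names ordered_args t ht
        refine PySem.List.mem_pyRange_one.2 ?_
        simp only [PySem.List.len_eq]
        omega)
  · rw [List.flatMap_def]
    rw [List.pairwise_flatten]
    constructor
    · intro l' hl'
      obtain ⟨i, _, rfl⟩ := List.mem_map.1 hl'
      have hpw := (pvTriples_pairwise_pos names ordered_args).filter (fun t => decide (t.1 = i))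
      refine hpw.imp_of_mem ?_
      intro a b ha hb hab
      have ha1 : a.1 = i := of_decide_eq_true (List.mem_filter.1 ha).2
      have hb1 : b.1 = i := of_decide_eq_true (List.mem_filter.1 hb).2
      exact Prod.Lex.toLex_lt_toLex.2 (Or.inr ⟨ha1.trans hb1.symm, hab⟩)
    · rw [List.pairwise_map]
      refine (PySem.List.pairwise_lt_pyRange_one _ _).imp ?_
      intro i j hij x hx y hy
      have hx1 : x.1 = i := of_decide_eq_true (List.mem_filter.1 hx).2
      have hy1 : y.1 = j := of_decide_eq_true (List.mem_filter.1 hy).2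
      exact Prod.Lex.toLex_lt_toLex.2 (Or.inl (by omega))

-- B's bucket-building loop over names is the pair loop over the matched (index, name) pairs
theorem pvBucketsDict_eq_pairs (ordered_args : List String) :
    ∀ (l : List String) (d : PySem.Dict Int (List String)),
      l.foldl (fun b n =>
        match (pvFirstIndex ordered_args).get? n with
        | some i => b.modify i [] (fun l => l ++ [n])
        | none => b) d
      = (l.filterMap (fun n => ((pvFirstIndex ordered_args).get? n).map (fun j => (j, n)))).foldl
          (fun d p => d.modify p.1 [] (fun l => l ++ [p.2])) d := by
  intro l
  induction l with
  | nil => intro d; rfl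
  | cons n l ih =>
    intro d
    cases h : (pvFirstIndex ordered_args).get? n <;>
      simp [h, ih]

-- the matched (index, name) pairs, filtered at i, are bucket i's names
theorem pvPairs_filter_eq (ordered_args : List String) (i : Int) :
    ∀ (l : List String) (s : Int),
      ((l.filterMap (fun n => ((pvFirstIndex ordered_args).get? n).map (fun j => (j, n)))).filter
          (fun q => q.1 == i)).map (fun q => q.2)
      = ((((PySem.List.enumerate l s).filter (fun p => (pvFirstIndex ordered_args).contains p.2)).map
            (fun p => ((pvFirstIndex ordered_args).getD p.2 0, p.1, p.2))).filter
          (fun t => decide (t.1 = i))).map (fun t => t.2.2) := by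
  intro l
  induction l with
  | nil => intro s; simp [PySem.List.enumerate_nil]
  | cons n l ih =>
    intro s
    rw [PySem.List.enumerate_cons]
    cases h : (pvFirstIndex ordered_args).get? n with
    | none =>
      have hc : (pvFirstIndex ordered_args).contains n = false :=
        (PySem.Dict.get?_eq_none_iff_contains _ _).1 h
      simp [h, hc, ih (s + 1)]
    | some j =>
      have hc : (pvFirstIndex ordered_args).contains n = true := by
        rw [PySem.Dict.contains_eq_isSome_get?, h]; rfl
      have hg : (pvFirstIndex ordered_args).getD n 0 = j :=
        PySem.Dict.getD_of_get?_eq_some _ _ h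
      by_cases hji : j = i <;>
        simp [h, hc, hg, hji, ih (s + 1)]

theorem pvBucketsDict_getD (names ordered_args : List String) (i : Int) :
    (pvBucketsDict names ordered_args).getD i []
    = ((pvTriples names ordered_args).filter (fun t => decide (t.1 = i))).map (fun t => t.2.2) := by
  unfold pvBucketsDict
  rw [pvBucketsDict_eq_pairs ordered_args names PySem.Dict.empty]
  rw [PySem.Dict.getD_foldl_modify_append]
  simp only [PySem.Dict.getD_empty, List.nil_append]
  exact pvPairs_filter_eq ordered_args i names 0

theorem pvBucket_map_fst (names ordered_args : List String) (i : Int) :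
    ((pvTriples names ordered_args).filter (fun t => decide (t.1 = i))).map (fun t => t.1)
    = List.replicate ((pvTriples names ordered_args).filter (fun t => decide (t.1 = i))).length i := by
  rw [List.eq_replicate_iff]
  constructor
  · simp
  · intro b hb
    obtain ⟨t, ht, rfl⟩ := List.mem_map.1 hb
    exact of_decide_eq_true (List.mem_filter.1 ht).2

theorem pvFoldl_pair (X : Int → List String) (Y : Int → List Int) (l : List Int) :
    ∀ (a : List String) (b : List Int),
      l.foldl (fun acc i => (acc.1 ++ X i, acc.2 ++ Y i)) (a, b)
        = (a ++ l.flatMap X, b ++ l.flatMap Y) := by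
  induction l with
  | nil => intro a b; simp
  | cons i l ih => intro a b; simp [ih, List.flatMap_cons]

-- ===== VERDICT (by name: the statement is the Claim_ definition above) =====
theorem align_and_sort_args_py_spec : Claim_equal_align_and_sort_args_py := by
  intro names ordered_args _
  unfold Spec_align_and_sort_args_py
  rw [pvPortA_eq, pvPortB_eq, pvSorted_eq_buckets, pvFoldl_pair]
  unfold pvBuckets
  rw [List.map_flatMap, List.map_flatMap]
  simp only [List.nil_append, Prod.mk.injEq]
  constructor
  · apply List.flatMap_congr
    intro i _
    exact (pvBucketsDict_getD names ordered_args i).symm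
  · apply List.flatMap_congr
    intro i _
    rw [pvBucket_map_fst, pvBucketsDict_getD]
    simp [PySem.List.pyRepeat_singleton, PySem.List.len]
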